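-- pv_equiv track=rewrite | github.com/hfrentzel/dotfiles | setup2/github.py | filter_assets
-- ===== SOURCE A (Python) =====
-- def filter_assets(asset_list):
--     # TODO Infer these values from environment and handle other
--     # possibilities
--     system_os = 'linux'
--     hardware = 'x86_64'
--     hardware_alt = 'amd64'
--     if False and any(a.endwiths('.deb') for a in asset_list):
--         # TODO handle deb files when sudo permissions are available
--         pass
--
--     if any(system_os in a for a in asset_list):
--         asset_list = [a for a in asset_list if system_os in a]
--     if any(hardware in a for a in asset_list):
--         asset_list = [a for a in asset_list if hardware in a]
--     if any(hardware_alt in a for a in asset_list):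
--         asset_list = [a for a in asset_list if hardware_alt in a]
--
--     if system_os == 'linux' and hardware == 'x86_64' and len(asset_list) == 2:
--         asset_list = [a for a in asset_list if 'musl' in a]
--
--     if len(asset_list) == 1:
--         return asset_list[0]
--     return None
-- ===== SOURCE B (Python) =====
-- def filter_assets(asset_list):
--     # Different algorithm: score every asset once with a 3-bit priority mask
--     # (linux=4, x86_64=2, amd64=1) and keep the assets attaining the maximal
--     # score.  This single argmax selection is equivalent to A's cascade of
--     # "filter if any match" passes, which keeps exactly the assets whose
--     # (linux, x86_64, amd64) membership triple is lexicographically maximal.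
--     if not asset_list:
--         return None
--     def rank(a):
--         return 4 * ('linux' in a) + 2 * ('x86_64' in a) + ('amd64' in a)
--     best = max(rank(a) for a in asset_list)
--     survivors = [a for a in asset_list if rank(a) == best]
--     if len(survivors) == 2:
--         survivors = [a for a in survivors if 'musl' in a]
--     return survivors[0] if len(survivors) == 1 else None
-- ===== Notes on version B (the rewrite author's own statement) =====
-- stated objective: alternative
-- what changed: Replaces A's cascade of three any()-check-then-refilter passes by a single argmax selection: each asset is scored once with a 3-bit priority mask (linux=4, x86_64=2, amd64=1) and the assets attaining the maximal score are kept, which provably equals the cascade's survivors; the dead if-False branch and always-true constant checks are dropped.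
import Mathlib
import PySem

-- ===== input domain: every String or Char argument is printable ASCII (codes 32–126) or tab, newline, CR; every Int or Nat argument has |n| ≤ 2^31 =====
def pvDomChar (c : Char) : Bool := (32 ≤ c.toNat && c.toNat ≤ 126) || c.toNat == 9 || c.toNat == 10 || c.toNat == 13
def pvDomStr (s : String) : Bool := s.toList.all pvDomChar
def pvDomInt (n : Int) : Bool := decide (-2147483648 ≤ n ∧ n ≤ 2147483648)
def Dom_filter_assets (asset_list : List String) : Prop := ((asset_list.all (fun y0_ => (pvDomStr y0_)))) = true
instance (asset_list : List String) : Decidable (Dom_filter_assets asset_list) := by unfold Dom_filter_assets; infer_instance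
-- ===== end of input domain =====

-- B replaces A's cascade of three any()-then-refilter passes by one argmax selection over a
-- 3-bit per-asset priority score (linux=4, x86_64=2, amd64=1); dead code dropped: alternative algorithm.


-- ===== PORT A =====
def filter_assets (asset_list : List String) : Option String :=
  let system_os := "linux"
  let hardware := "x86_64"
  let hardware_alt := "amd64"
  -- `if False and any(...)` is dead code: ported as nothing
  let l1 := if asset_list.any (fun a => PySem.Str.isIn system_os a) then
              asset_list.filter (fun a => PySem.Str.isIn system_os a) else asset_list
  let l2 := if l1.any (fun a => PySem.Str.isIn hardware a) then
              l1.filter (fun a => PySem.Str.isIn hardware a) else l1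
  let l3 := if l2.any (fun a => PySem.Str.isIn hardware_alt a) then
              l2.filter (fun a => PySem.Str.isIn hardware_alt a) else l2
  let l4 := if system_os == "linux" && hardware == "x86_64" && l3.length == 2 then
              l3.filter (fun a => PySem.Str.isIn "musl" a) else l3
  if l4.length == 1 then PySem.List.pyGet? l4 0 else none

-- ===== PORT B =====
-- 3-bit priority score of one asset (Python's `rank`)
def faRank (a : String) : Int :=
  4 * (if PySem.Str.isIn "linux" a then (1:Int) else 0)
    + 2 * (if PySem.Str.isIn "x86_64" a then (1:Int) else 0)
    + (if PySem.Str.isIn "amd64" a then (1:Int) else 0)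

def filter_assets_alt (asset_list : List String) : Option String :=
  match asset_list with
  | [] => none
  | x :: xs =>
    let best := xs.foldl (fun m a => max m (faRank a)) (faRank x)   -- max(rank(a) for a in asset_list)
    let survivors := (x :: xs).filter (fun a => faRank a == best)
    let s2 := if survivors.length == 2 then survivors.filter (fun a => PySem.Str.isIn "musl" a) else survivors
    if s2.length == 1 then PySem.List.pyGet? s2 0 else none

-- ===== PRECONDITION & SPEC =====
def Spec_filter_assets (asset_list : List String) (out : Option String) : Prop := out = filter_assets_alt asset_list
instance (asset_list : List String) (out : Option String) : Decidable (Spec_filter_assets asset_list out) := by unfold Spec_filter_assets; infer_instance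

-- ===== CLAIM (what is proved, stated in full; the proofs are below) =====
def Claim_equal_filter_assets : Prop := ∀ (asset_list : List String), Dom_filter_assets asset_list → Spec_filter_assets asset_list (filter_assets asset_list)

-- ===== LEMMAS AND PROOFS =====

-- A's "if any f then filter f" step, rewritten as an unconditional filter against `l.any f`.
def pvStageF {α : Type} (f : α → Bool) (l : List α) : List α := l.filter (fun a => f a == l.any f)

theorem pvStage_eq {α : Type} (f : α → Bool) (l : List α) :
    (if l.any f then l.filter f else l) = pvStageF f l := by
  unfold pvStageF
  cases h : l.any f with
  | true =>
    rw [if_pos rfl]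
    exact (List.filter_congr (fun a _ => by simp)).symm
  | false =>
    have hall := List.any_eq_false.mp h
    rw [if_neg (by simp)]
    exact (List.filter_eq_self.mpr (fun a ha => by simp [hall a ha])).symm

def pvB2i (b : Bool) : Int := if b then 1 else 0

def pvRk {α : Type} (f1 f2 f3 : α → Bool) (a : α) : Int :=
  4 * pvB2i (f1 a) + 2 * pvB2i (f2 a) + pvB2i (f3 a)

-- B's faRank is pvRk at the three concrete substring tests.
theorem faRank_eq :
    faRank = pvRk (fun a => PySem.Str.isIn "linux" a) (fun a => PySem.Str.isIn "x86_64" a)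
                  (fun a => PySem.Str.isIn "amd64" a) := rfl

-- rank comparisons on triples of bools, discharged by decide
theorem pvRk_le_of_lex (b1 b2 b3 c1 c2 c3 : Bool)
    (h1 : b1 = true → c1 = true)
    (h2 : b1 = c1 → b2 = true → c2 = true)
    (h3 : b1 = c1 → b2 = c2 → b3 = true → c3 = true) :
    4 * pvB2i b1 + 2 * pvB2i b2 + pvB2i b3 ≤ 4 * pvB2i c1 + 2 * pvB2i c2 + pvB2i c3 := by
  revert h1 h2 h3; cases b1 <;> cases b2 <;> cases b3 <;> cases c1 <;> cases c2 <;> cases c3 <;> decide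

theorem pvRk_beq (b1 b2 b3 c1 c2 c3 : Bool) :
    ((4 * pvB2i b1 + 2 * pvB2i b2 + pvB2i b3 : Int) == 4 * pvB2i c1 + 2 * pvB2i c2 + pvB2i c3)
      = (b3 == c3 && (b2 == c2 && b1 == c1)) := by
  cases b1 <;> cases b2 <;> cases b3 <;> cases c1 <;> cases c2 <;> cases c3 <;> decide

-- foldl max over a list equals any value that bounds all entries and is attained
theorem pvFoldlMax_eq {α : Type} (g : α → Int) (R : Int) :
    ∀ (l : List α) (init : Int), (∀ a ∈ l, g a ≤ R) → init ≤ R → (init = R ∨ ∃ a ∈ l, g a = R) →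
    l.foldl (fun m a => max m (g a)) init = R := by
  intro l
  induction l with
  | nil => intro init _ _ hat; simpa using hat.elim id (by simp)
  | cons a l ih =>
    intro init hub hinit hat
    simp only [List.foldl_cons]
    apply ih
    · intro b hb; exact hub b (List.mem_cons_of_mem _ hb)
    · exact max_le hinit (hub a List.mem_cons_self)
    · rcases hat with h | ⟨b, hb, hgb⟩
      · left; subst h; exact max_eq_left (hub a List.mem_cons_self)
      · rcases List.mem_cons.mp hb with rfl | hb'
        · left; rw [hgb]; exact max_eq_right hinit
        · right; exact ⟨b, hb', hgb⟩

theorem pvStageF_ne_nil {α : Type} (f : α → Bool) (l : List α) (h : l ≠ []) :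
    pvStageF f l ≠ [] := by
  unfold pvStageF
  cases hany : l.any f with
  | true =>
    obtain ⟨a, ha, hfa⟩ := List.any_eq_true.mp hany
    intro hnil
    have := List.filter_eq_nil_iff.mp hnil a ha
    simp [hfa] at this
  | false =>
    have := List.any_eq_false.mp hany
    rw [List.filter_eq_self.mpr (fun a ha => by simp [this a ha])]
    exact h

-- The heart of the equivalence: the three-stage cascade equals filtering by maximal rank.
theorem pvCascade_eq {α : Type} (f1 f2 f3 : α → Bool) (x : α) (xs : List α) :
    pvStageF f3 (pvStageF f2 (pvStageF f1 (x :: xs)))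
      = (x :: xs).filter (fun a =>
          pvRk f1 f2 f3 a == xs.foldl (fun m a => max m (pvRk f1 f2 f3 a)) (pvRk f1 f2 f3 x)) := by
  set l := x :: xs with hl
  set m1 := l.any f1 with hm1
  set L1 := pvStageF f1 l with hL1
  set m2 := L1.any f2 with hm2
  set L2 := pvStageF f2 L1 with hL2
  set m3 := L2.any f3 with hm3
  set L3 := pvStageF f3 L2 with hL3
  -- membership helpers
  have memL1 : ∀ a, a ∈ L1 ↔ a ∈ l ∧ f1 a = m1 := by
    intro a; rw [hL1]; unfold pvStageF; rw [← hm1, List.mem_filter]; simp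
  have memL2 : ∀ a, a ∈ L2 ↔ (a ∈ l ∧ f1 a = m1) ∧ f2 a = m2 := by
    intro a; rw [hL2]; unfold pvStageF; rw [← hm2, List.mem_filter, memL1]; simp
  set R := 4 * pvB2i m1 + 2 * pvB2i m2 + pvB2i m3 with hR
  -- upper bound
  have hub : ∀ a ∈ l, pvRk f1 f2 f3 a ≤ R := by
    intro a ha
    have h1 : f1 a = true → m1 = true := fun h => hm1 ▸ List.any_eq_true.mpr ⟨a, ha, h⟩
    have h2 : f1 a = m1 → f2 a = true → m2 = true := fun he h =>
      hm2 ▸ List.any_eq_true.mpr ⟨a, (memL1 a).mpr ⟨ha, he⟩, h⟩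
    have h3 : f1 a = m1 → f2 a = m2 → f3 a = true → m3 = true := fun he1 he2 h =>
      hm3 ▸ List.any_eq_true.mpr ⟨a, (memL2 a).mpr ⟨⟨ha, he1⟩, he2⟩, h⟩
    exact pvRk_le_of_lex _ _ _ _ _ _ h1 h2 h3
  -- attained
  have hat : ∃ a ∈ l, pvRk f1 f2 f3 a = R := by
    have h3ne : L3 ≠ [] := by
      rw [hL3]
      exact pvStageF_ne_nil _ _ (by rw [hL2]; exact pvStageF_ne_nil _ _ (by
        rw [hL1]; exact pvStageF_ne_nil _ _ (by simp [hl])))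
    obtain ⟨a, ha3⟩ := List.exists_mem_of_ne_nil _ h3ne
    have ha3' : a ∈ L2 ∧ f3 a = m3 := by
      have := ha3; rw [hL3] at this; unfold pvStageF at this
      rw [← hm3, List.mem_filter] at this; simpa using this
    obtain ⟨⟨ha, he1⟩, he2⟩ := (memL2 a).mp ha3'.1
    exact ⟨a, ha, by rw [pvRk, he1, he2, ha3'.2, hR]⟩
  -- foldl equals R
  have hfold : xs.foldl (fun m a => max m (pvRk f1 f2 f3 a)) (pvRk f1 f2 f3 x) = R := by
    apply pvFoldlMax_eq
    · intro a ha; exact hub a (by rw [hl]; exact List.mem_cons_of_mem _ ha)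
    · exact hub x (by rw [hl]; exact List.mem_cons_self)
    · rcases hat with ⟨a, ha, hra⟩
      rw [hl] at ha
      rcases List.mem_cons.mp ha with rfl | ha'
      · exact Or.inl hra
      · exact Or.inr ⟨a, ha', hra⟩
  rw [hfold]
  -- both sides are filters over l; compare pointwise
  have e1 : L1 = l.filter (fun a => f1 a == m1) := by
    rw [hL1]; unfold pvStageF; rw [← hm1]
  have e2 : L2 = l.filter (fun a => f2 a == m2 && f1 a == m1) := by
    rw [hL2]; unfold pvStageF; rw [← hm2, e1, List.filter_filter]
  have e3 : L3 = l.filter (fun a => f3 a == m3 && (f2 a == m2 && f1 a == m1)) := by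
    rw [hL3]; unfold pvStageF; rw [← hm3, e2, List.filter_filter]
  rw [e3]
  refine List.filter_congr (fun a _ => ?_)
  rw [hR]; unfold pvRk
  exact (pvRk_beq (f1 a) (f2 a) (f3 a) m1 m2 m3).symm

-- ===== VERDICT (by name: the statement is the Claim_ definition above) =====
theorem filter_assets_spec : Claim_equal_filter_assets := by
  intro asset_list _
  unfold Spec_filter_assets
  cases asset_list with
  | nil => rfl
  | cons x xs =>
    show filter_assets (x :: xs) = filter_assets_alt (x :: xs)
    unfold filter_assets filter_assets_alt
    simp only [pvStage_eq, faRank_eq, beq_self_eq_true, Bool.true_and]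
    rw [pvCascade_eq]
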